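-- pv_equiv track=rewrite | github.com/paniash/p452-computational | library.py | gs_decompose
-- ===== SOURCE A (Python) =====
-- def gs_decompose(A):
--     U = [[0 for i in range(len(A))] for j in range(len(A))]
--     L = [[0 for i in range(len(A))] for j in range(len(A))]
--
--     for i in range(len(A)):
--         for j in range(len(A)):
--             if i >= j:
--                 L[i][j] = A[i][j]
--             else:
--                 U[i][j] = A[i][j]
--
--     return L, U
-- ===== SOURCE B (Python) =====
-- def gs_decompose(A):
--     # column-major construction: build the transposes of L and U (column j of L is
--     # j zeros followed by the lower part of A's column j; column j of U is the upper
--     # part of A's column j followed by zeros), then transpose them back with zip(*...)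
--     n = len(A)
--     Lt = [[0] * j + [A[i][j] for i in range(j, n)] for j in range(n)]
--     Ut = [[A[i][j] for i in range(j)] + [0] * (n - j) for j in range(n)]
--     L = [list(r) for r in zip(*Lt)]
--     U = [list(r) for r in zip(*Ut)]
--     return L, U
-- ===== Notes on version B (the rewrite author's own statement) =====
-- stated objective: alternative
-- what changed: Builds the transposes of L and U column-by-column (each column of L is j zeros followed by the lower part of A's column j, dually for U) and transposes them back with zip(*...), instead of A's row-major n-by-n double loop with an i>=j branch writing into preallocated zero matrices.
import Mathlib
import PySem

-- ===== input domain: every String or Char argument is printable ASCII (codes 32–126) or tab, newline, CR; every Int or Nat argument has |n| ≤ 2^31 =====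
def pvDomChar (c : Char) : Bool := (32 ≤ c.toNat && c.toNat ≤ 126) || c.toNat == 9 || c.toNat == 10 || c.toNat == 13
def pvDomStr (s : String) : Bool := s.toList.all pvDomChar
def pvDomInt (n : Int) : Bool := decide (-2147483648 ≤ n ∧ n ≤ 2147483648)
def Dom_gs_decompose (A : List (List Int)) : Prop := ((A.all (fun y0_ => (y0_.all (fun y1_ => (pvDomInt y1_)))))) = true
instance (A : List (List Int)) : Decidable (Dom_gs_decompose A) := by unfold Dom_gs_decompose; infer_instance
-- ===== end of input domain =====

-- B builds the transposes of L and U column-by-column and transposes them back with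
-- zip(*...), instead of A's row-major double loop with an i>=j branch (alternative
-- decomposition of the same O(n^2) task).

-- ===== PORT A =====
-- literal port: two zero matrices, nested loops i,j over range(len(A)),
-- branch i ≥ j writes A[i][j] into L, else into U (indices in range under Pre_)
def gs_decompose (A : List (List Int)) : List (List Int) × List (List Int) :=
  let n := A.length
  let U0 : List (List Int) := List.replicate n (List.replicate n 0)
  let L0 : List (List Int) := List.replicate n (List.replicate n 0)
  let LU := (List.range n).foldl (fun LU i =>
    (List.range n).foldl (fun LU j =>
      if i ≥ j then
        (LU.1.modify i (fun r => r.set j ((A.getD i []).getD j 0)), LU.2)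
      else
        (LU.1, LU.2.modify i (fun r => r.set j ((A.getD i []).getD j 0)))) LU) (L0, U0)
  (LU.1, LU.2)

-- ===== PORT B =====
-- zip(*M): exact port of Python's zip over the rows of M — emit the tuple of heads,
-- recurse on the tails, stop as soon as some row is exhausted
def pyZipStar (M : List (List Int)) : List (List Int) :=
  if M.isEmpty || M.any (fun r => r.isEmpty) then []
  else (M.map (fun r => r.headD 0)) :: pyZipStar (M.map List.tail)
termination_by (M.headD []).length
decreasing_by
  cases M with
  | nil => simp at *
  | cons r rest =>
    simp only [List.isEmpty_cons, List.any_cons, Bool.or_eq_true] at *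
    cases r with
    | nil => simp_all
    | cons x xs => simp

-- literal port of Source B: the two column comprehensions, then zip(*...) on each
def gs_decompose_alt (A : List (List Int)) : List (List Int) × List (List Int) :=
  let n := A.length
  let Lt := (List.range n).map (fun j =>
    List.replicate j (0 : Int) ++ (List.range' j (n - j)).map (fun i => (A.getD i []).getD j 0))
  let Ut := (List.range n).map (fun j =>
    (List.range j).map (fun i => (A.getD i []).getD j 0) ++ List.replicate (n - j) (0 : Int))
  (pyZipStar Lt, pyZipStar Ut)

-- ===== PRECONDITION & SPEC =====
-- Pre_ excludes exactly the inputs on which A raises IndexError: A reads A[i][j]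
-- for all j < len(A), so every row must have at least len(A) entries.
def Pre_gs_decompose (A : List (List Int)) : Prop := ∀ r ∈ A, A.length ≤ r.length
instance (A : List (List Int)) : Decidable (Pre_gs_decompose A) := by unfold Pre_gs_decompose; infer_instance
def pvWitness_gs_decompose : List (List Int) := [[1, 2], [3, 4]]
def Spec_gs_decompose (A : List (List Int)) (out : List (List Int) × List (List Int)) : Prop := out = gs_decompose_alt A
instance (A : List (List Int)) (out : List (List Int) × List (List Int)) : Decidable (Spec_gs_decompose A out) := by unfold Spec_gs_decompose; infer_instance

-- ===== CLAIM (what is proved, stated in full; the proofs are below) =====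
def Claim_equal_gs_decompose : Prop := ∀ (A : List (List Int)), Dom_gs_decompose A → Pre_gs_decompose A → Spec_gs_decompose A (gs_decompose A)

-- ===== LEMMAS AND PROOFS =====

-- common normal form both ports are proved equal to: row i of L is the prefix
-- A[i][0..i] padded with zeros, row i of U is i+1 zeros then A[i][i+1..n-1]
def pvMapsL (A : List (List Int)) : List (List Int) :=
  (List.range A.length).map (fun i =>
    (List.range (i + 1)).map (fun j => (A.getD i []).getD j 0) ++ List.replicate (A.length - i - 1) 0)

def pvMapsU (A : List (List Int)) : List (List Int) :=
  (List.range A.length).map (fun i =>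
    List.replicate (i + 1) (0 : Int) ++ (List.range' (i + 1) (A.length - (i + 1))).map (fun j => (A.getD i []).getD j 0))

-- a fold whose step updates the two components independently splits componentwise
theorem pv_foldl_prod {α γ : Type} (f : α → ℕ → α) (g : γ → ℕ → γ) (l : List ℕ) (a : α) (c : γ) :
    l.foldl (fun p b => (f p.1 b, g p.2 b)) (a, c) = (l.foldl f a, l.foldl g c) := by
  induction l generalizing a c with
  | nil => rfl
  | cons x xs ih => simp [List.foldl, ih]

theorem pv_modify_id {α : Type} (l : List α) (i : ℕ) : l.modify i (fun r => r) = l := by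
  apply List.ext_getElem?
  intro j
  simp [List.getElem?_modify]

theorem pv_modify_modify {α : Type} (l : List α) (i : ℕ) (f g : α → α) :
    (l.modify i f).modify i g = l.modify i (fun r => g (f r)) := by
  apply List.ext_getElem?
  intro j
  simp only [List.getElem?_modify, Option.map_eq_map, Option.map_map]
  cases l[j]? with
  | none => rfl
  | some a => by_cases h : i = j <;> simp [h, Function.comp]

-- hoist a per-step modify at a fixed row index out of a fold
theorem pv_foldl_modify_hoist {α : Type} (i : ℕ) (g : ℕ → α → α) (js : List ℕ) :
    ∀ (L : List α), js.foldl (fun L j => L.modify i (g j)) L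
      = L.modify i (fun r => js.foldl (fun r j => g j r) r) := by
  induction js with
  | nil => intro L; simp [List.foldl, pv_modify_id]
  | cons j js ih =>
      intro L
      simp only [List.foldl]
      rw [ih, pv_modify_modify]

-- length of a conditional-set fold over range n
theorem pv_foldl_setIf_length (c : ℕ → Prop) [DecidablePred c] (v : ℕ → Int) (n : ℕ) (r : List Int) :
    ((List.range n).foldl (fun r j => if c j then r.set j (v j) else r) r).length = r.length := by
  induction n with
  | zero => rfl
  | succ m ih =>
      rw [List.range_succ, List.foldl_append]
      simp only [List.foldl]
      split <;> simp [ih]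

-- element k of a conditional-set fold over range n
theorem pv_foldl_setIf_getElem? (c : ℕ → Prop) [DecidablePred c] (v : ℕ → Int) (n k : ℕ) (r : List Int) :
    ((List.range n).foldl (fun r j => if c j then r.set j (v j) else r) r)[k]?
      = if c k ∧ k < n ∧ k < r.length then some (v k) else r[k]? := by
  induction n with
  | zero => simp
  | succ m ih =>
      rw [List.range_succ, List.foldl_append]
      simp only [List.foldl]
      by_cases hc : c m
      · rw [if_pos hc, List.getElem?_set, pv_foldl_setIf_length, ih]
        by_cases hk : m = k
        · subst hk
          by_cases hl : m < r.length
          · simp [hc, hl]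
          · have h1 : ¬ (c m ∧ m < m ∧ m < r.length) := by tauto
            have h2 : ¬ (c m ∧ m < m + 1 ∧ m < r.length) := by tauto
            simp only [if_neg h1, if_neg h2, if_neg hl]
            exact (List.getElem?_eq_none (by omega)).symm
        · rw [if_neg hk]
          by_cases h : c k ∧ k < m ∧ k < r.length
          · have h' : c k ∧ k < m + 1 ∧ k < r.length := ⟨h.1, by omega, h.2.2⟩
            rw [if_pos h, if_pos h']
          · have h' : ¬ (c k ∧ k < m + 1 ∧ k < r.length) := by
              rintro ⟨h1, h2, h3⟩; exact h ⟨h1, by omega, h3⟩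
            rw [if_neg h, if_neg h']
      · rw [if_neg hc, ih]
        by_cases h : c k ∧ k < m ∧ k < r.length
        · have h' : c k ∧ k < m + 1 ∧ k < r.length := ⟨h.1, by omega, h.2.2⟩
          rw [if_pos h, if_pos h']
        · by_cases h' : c k ∧ k < m + 1 ∧ k < r.length
          · exfalso
            rcases h' with ⟨h1, h2, h3⟩
            have hkm : k = m := by
              by_contra hne
              exact h ⟨h1, by omega, h3⟩
            exact hc (hkm ▸ h1)
          · rw [if_neg h, if_neg h']

-- element k of a fold that modifies row i at step i, over range m
theorem pv_foldl_modifyRows_getElem? (g : ℕ → List Int → List Int) (m k : ℕ) :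
    ∀ (L : List (List Int)), ((List.range m).foldl (fun L i => L.modify i (g i)) L)[k]?
      = if k < m then (L[k]?).map (g k) else L[k]? := by
  induction m with
  | zero => simp
  | succ m ih =>
      intro L
      rw [List.range_succ, List.foldl_append]
      simp only [List.foldl]
      rw [List.getElem?_modify, ih]
      by_cases hk : m = k
      · subst hk
        simp
      · by_cases h : k < m
        · have h2 : k < m + 1 := by omega
          simp only [if_pos h, if_pos h2]
          cases L[k]? <;> simp [hk]
        · have h' : ¬ k < m + 1 := by omega
          simp only [if_neg h, if_neg h']
          cases L[k]? <;> simp [hk]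

-- total getElem? forms of List.getElem?_range / getElem?_range' (Mathlib's carry an i < n hypothesis)
theorem pv_getElem?_range (n i : ℕ) : (List.range n)[i]? = if i < n then some i else none := by
  by_cases h : i < n
  · rw [List.getElem?_range h, if_pos h]
  · rw [if_neg h, List.getElem?_eq_none (by simpa using Nat.le_of_not_lt h)]

theorem pv_getElem?_range' (s n i : ℕ) : (List.range' s n)[i]? = if i < n then some (s + i) else none := by
  by_cases h : i < n
  · rw [List.getElem?_range' h, if_pos h, Nat.one_mul]
  · rw [if_neg h, List.getElem?_eq_none (by simpa using Nat.le_of_not_lt h)]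

-- A's port equals the normal form (the two folds are split, hoisted and read off elementwise)
theorem pv_A_eq_maps (A : List (List Int)) : gs_decompose A = (pvMapsL A, pvMapsU A) := by
  unfold gs_decompose pvMapsL pvMapsU
  simp only []
  set n := A.length with hn
  set v : ℕ → ℕ → Int := fun i j => (A.getD i []).getD j 0 with hv
  have hinner : ∀ (i : ℕ) (LU : List (List Int) × List (List Int)),
      (List.range n).foldl (fun LU j =>
        if i ≥ j then
          (LU.1.modify i (fun r => r.set j (v i j)), LU.2)
        else
          (LU.1, LU.2.modify i (fun r => r.set j (v i j)))) LU
      = (LU.1.modify i (fun r => (List.range n).foldl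
            (fun r j => if i ≥ j then r.set j (v i j) else r) r),
         LU.2.modify i (fun r => (List.range n).foldl
            (fun r j => if i ≥ j then r else r.set j (v i j)) r)) := by
    intro i LU
    have hstep : (fun (LU : List (List Int) × List (List Int)) j =>
        if i ≥ j then
          (LU.1.modify i (fun r => r.set j (v i j)), LU.2)
        else
          (LU.1, LU.2.modify i (fun r => r.set j (v i j))))
      = (fun LU j =>
          (LU.1.modify i (fun r => if i ≥ j then r.set j (v i j) else r),
           LU.2.modify i (fun r => if i ≥ j then r else r.set j (v i j)))) := by
      funext LU j
      by_cases h : i ≥ j <;> simp [h, pv_modify_id]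
    rw [hstep]
    have hp := pv_foldl_prod
      (fun (L : List (List Int)) j => L.modify i (fun r => if i ≥ j then r.set j (v i j) else r))
      (fun (U : List (List Int)) j => U.modify i (fun r => if i ≥ j then r else r.set j (v i j)))
      (List.range n) LU.1 LU.2
    exact hp.trans (by rw [pv_foldl_modify_hoist, pv_foldl_modify_hoist])
  have houter : (List.range n).foldl (fun LU i =>
      (List.range n).foldl (fun LU j =>
        if i ≥ j then
          (LU.1.modify i (fun r => r.set j (v i j)), LU.2)
        else
          (LU.1, LU.2.modify i (fun r => r.set j (v i j)))) LU)
      (List.replicate n (List.replicate n 0), List.replicate n (List.replicate n 0))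
    = ((List.range n).foldl (fun L i => L.modify i (fun r => (List.range n).foldl
          (fun r j => if i ≥ j then r.set j (v i j) else r) r)) (List.replicate n (List.replicate n 0)),
       (List.range n).foldl (fun U i => U.modify i (fun r => (List.range n).foldl
          (fun r j => if i ≥ j then r else r.set j (v i j)) r)) (List.replicate n (List.replicate n 0))) := by
    rw [show (fun (LU : List (List Int) × List (List Int)) i =>
      (List.range n).foldl (fun LU j =>
        if i ≥ j then
          (LU.1.modify i (fun r => r.set j (v i j)), LU.2)
        else
          (LU.1, LU.2.modify i (fun r => r.set j (v i j)))) LU)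
      = (fun LU i =>
          (LU.1.modify i (fun r => (List.range n).foldl
            (fun r j => if i ≥ j then r.set j (v i j) else r) r),
           LU.2.modify i (fun r => (List.range n).foldl
            (fun r j => if i ≥ j then r else r.set j (v i j)) r))) from funext fun LU => funext fun i => hinner i LU]
    exact pv_foldl_prod
      (fun (L : List (List Int)) i => L.modify i (fun r => (List.range n).foldl
          (fun r j => if i ≥ j then r.set j (v i j) else r) r))
      (fun (U : List (List Int)) i => U.modify i (fun r => (List.range n).foldl
          (fun r j => if i ≥ j then r else r.set j (v i j)) r))
      (List.range n) _ _
  rw [houter]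
  refine Prod.ext ?_ ?_
  · -- L component
    apply List.ext_getElem?
    intro k
    rw [pv_foldl_modifyRows_getElem? (fun i r => (List.range n).foldl
          (fun r j => if i ≥ j then r.set j (v i j) else r) r)]
    rw [List.getElem?_map, pv_getElem?_range, List.getElem?_replicate]
    by_cases hk : k < n
    · simp only [if_pos hk, Option.map_some]
      congr 1
      apply List.ext_getElem?
      intro m
      rw [pv_foldl_setIf_getElem? (fun j => k ≥ j) (v k)]
      simp only [List.getElem?_append, List.getElem?_map, pv_getElem?_range,
        List.getElem?_replicate, List.length_map, List.length_range, List.length_replicate]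
      split_ifs <;> first | rfl | (exfalso; omega)
    · simp only [if_neg hk, Option.map_none]
  · -- U component
    apply List.ext_getElem?
    intro k
    rw [pv_foldl_modifyRows_getElem? (fun i r => (List.range n).foldl
          (fun r j => if i ≥ j then r else r.set j (v i j)) r)]
    rw [List.getElem?_map, pv_getElem?_range, List.getElem?_replicate]
    by_cases hk : k < n
    · simp only [if_pos hk, Option.map_some]
      congr 1
      have hstep : (fun (r : List Int) j => if k ≥ j then r else r.set j (v k j))
          = (fun r j => if ¬ k ≥ j then r.set j (v k j) else r) := by
        funext r j
        by_cases h : k ≥ j <;> simp [h]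
      rw [hstep]
      apply List.ext_getElem?
      intro m
      rw [pv_foldl_setIf_getElem? (fun j => ¬ k ≥ j) (v k)]
      simp only [List.getElem?_append, List.getElem?_map, pv_getElem?_range',
        List.getElem?_replicate, List.length_replicate]
      split_ifs <;> first
        | rfl
        | (exfalso; omega)
        | (rw [show k + 1 + (m - (k + 1)) = m from by omega]; simp [hv])
    · simp only [if_neg hk, Option.map_none]

theorem pv_tail_getD (r : List Int) (i : ℕ) : r.tail.getD i 0 = r.getD (i + 1) 0 := by
  cases r <;> simp [List.getD]

theorem pv_headD_eq_getD (r : List Int) : r.headD 0 = r.getD 0 0 := by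
  cases r <;> simp [List.getD]

-- zip(*M) on a nonempty matrix whose rows all have length m is the transpose
theorem pv_zipStar_const_len (m : ℕ) : ∀ (M : List (List Int)), M ≠ [] →
    (∀ r ∈ M, r.length = m) →
    pyZipStar M = (List.range m).map (fun i => M.map (fun r => r.getD i 0)) := by
  induction m with
  | zero =>
      intro M hne hlen
      rw [pyZipStar]
      have : M.any (fun r => r.isEmpty) = true := by
        cases M with
        | nil => exact absurd rfl hne
        | cons r rest =>
            simp only [List.any_cons, Bool.or_eq_true]
            left
            simp [List.length_eq_zero_iff.mp (hlen r (by simp))]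
      simp [this]
  | succ m ih =>
      intro M hne hlen
      rw [pyZipStar]
      have hnoempty : M.any (fun r => r.isEmpty) = false := by
        rw [List.any_eq_false]
        intro r hr
        have := hlen r hr
        cases r with
        | nil => simp at this
        | cons x xs => simp
      have hMe : M.isEmpty = false := by
        cases M with
        | nil => exact absurd rfl hne
        | cons r rest => simp
      rw [hMe, hnoempty]
      simp only [Bool.or_self, if_neg (by simp : ¬ (false = true))]
      have htail : ∀ r ∈ M.map List.tail, r.length = m := by
        intro r hr
        rcases List.mem_map.mp hr with ⟨s, hs, rfl⟩
        have := hlen s hs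
        cases s with
        | nil => simp at this
        | cons x xs => simpa using this
      have hne' : M.map List.tail ≠ [] := by
        cases M with
        | nil => exact absurd rfl hne
        | cons r rest => simp
      rw [ih (M.map List.tail) hne' htail]
      rw [List.range_succ_eq_map, List.map_cons, List.map_map]
      congr 1
      · exact List.map_congr_left fun r _ => pv_headD_eq_getD r
      · apply List.map_congr_left
        intro i _
        simp only [Function.comp, List.map_map]
        exact List.map_congr_left fun r _ => pv_tail_getD r i

-- value of entry i of L's column j (zeros above the diagonal cut at j)
theorem pv_colL_getD (v : ℕ → ℕ → Int) (n j i : ℕ) (hj : j < n) :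
    (List.replicate j (0:Int) ++ (List.range' j (n - j)).map (fun i => v i j)).getD i 0
      = if i < j then 0 else if i < n then v i j else 0 := by
  rw [List.getD_eq_getElem?_getD]
  simp only [List.getElem?_append, List.length_replicate, List.getElem?_replicate,
    List.getElem?_map, pv_getElem?_range']
  split_ifs <;> first
    | (exfalso; omega)
    | (rw [Nat.add_sub_cancel' (by omega : j ≤ i)]; simp)
    | simp

-- value of entry i of U's column j (zeros from the diagonal down)
theorem pv_colU_getD (v : ℕ → ℕ → Int) (n j i : ℕ) :
    ((List.range j).map (fun i => v i j) ++ List.replicate (n - j) (0:Int)).getD i 0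
      = if i < j then v i j else 0 := by
  rw [List.getD_eq_getElem?_getD]
  simp only [List.getElem?_append, List.length_map, List.length_range, List.getElem?_replicate,
    List.getElem?_map, pv_getElem?_range]
  split_ifs <;> simp_all

-- B's port equals the normal form
theorem pv_alt_eq_maps (A : List (List Int)) : gs_decompose_alt A = (pvMapsL A, pvMapsU A) := by
  unfold gs_decompose_alt pvMapsL pvMapsU
  simp only []
  set n := A.length with hn
  set v : ℕ → ℕ → Int := fun i j => (A.getD i []).getD j 0 with hv
  cases Nat.eq_zero_or_pos n with
  | inl h0 =>
      rw [h0]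
      simp [pyZipStar]
  | inr hpos =>
      have hlenL : ∀ r ∈ (List.range n).map (fun j =>
          List.replicate j (0:Int) ++ (List.range' j (n - j)).map (fun i => v i j)), r.length = n := by
        intro r hr
        rcases List.mem_map.mp hr with ⟨j, hj, rfl⟩
        have hjn : j < n := List.mem_range.mp hj
        simp
        omega
      have hlenU : ∀ r ∈ (List.range n).map (fun j =>
          (List.range j).map (fun i => v i j) ++ List.replicate (n - j) (0:Int)), r.length = n := by
        intro r hr
        rcases List.mem_map.mp hr with ⟨j, hj, rfl⟩
        have hjn : j < n := List.mem_range.mp hj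
        simp
        omega
      have hneL : (List.range n).map (fun j =>
          List.replicate j (0:Int) ++ (List.range' j (n - j)).map (fun i => v i j)) ≠ [] := by
        simp [List.map_eq_nil_iff, List.range_eq_nil]
        omega
      have hneU : (List.range n).map (fun j =>
          (List.range j).map (fun i => v i j) ++ List.replicate (n - j) (0:Int)) ≠ [] := by
        simp [List.map_eq_nil_iff, List.range_eq_nil]
        omega
      rw [pv_zipStar_const_len n _ hneL hlenL, pv_zipStar_const_len n _ hneU hlenU]
      refine Prod.ext ?_ ?_
      · -- L component
        apply List.ext_getElem?
        intro i
        simp only [List.getElem?_map, pv_getElem?_range]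
        by_cases hi : i < n
        · simp only [if_pos hi, Option.map_some]
          congr 1
          apply List.ext_getElem?
          intro j
          simp only [List.getElem?_map, pv_getElem?_range, List.getElem?_append,
            List.length_map, List.length_range, List.getElem?_replicate]
          by_cases hj : j < n
          · simp only [if_pos hj, Option.map_some]
            rw [pv_colL_getD v n j i hj]
            split_ifs <;> first | rfl | (exfalso; omega)
          · simp only [if_neg hj, Option.map_none]
            split_ifs <;> first | rfl | (exfalso; omega)
        · simp [if_neg hi]
      · -- U component
        apply List.ext_getElem?
        intro i
        simp only [List.getElem?_map, pv_getElem?_range]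
        by_cases hi : i < n
        · simp only [if_pos hi, Option.map_some]
          congr 1
          apply List.ext_getElem?
          intro j
          simp only [List.getElem?_map, pv_getElem?_range, pv_getElem?_range', List.getElem?_append,
            List.length_replicate, List.getElem?_replicate]
          by_cases hj : j < n
          · simp only [if_pos hj, Option.map_some]
            rw [pv_colU_getD v n j i]
            split_ifs <;> first
              | rfl
              | (exfalso; omega)
              | (rw [Nat.add_sub_cancel' (by omega : i + 1 ≤ j)]; rfl)
          · simp only [if_neg hj, Option.map_none]
            split_ifs <;> first | rfl | (exfalso; omega)
        · simp [if_neg hi]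

-- ===== VERDICT (by name: the statement is the Claim_ definition above) =====
theorem gs_decompose_spec : Claim_equal_gs_decompose := by
  intro A _hdom _hpre
  unfold Spec_gs_decompose
  rw [pv_A_eq_maps, pv_alt_eq_maps]
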